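-- pv_equiv track=rewrite | github.com/joecom7/advent-of-code-2024 | 5/solution.py | reorder_by_rules
-- ===== SOURCE A (Python) =====
-- def reorder_by_rules(numbers,rules):
--
--     reordered_numbers = []
--
--     for j in range(0,len(numbers)):
--
--         # we need to found the j-th number
--         # it is the number that put in j-th pos satisfies
--         # all the constraints
--
--         found_valid = False
--         index_found = -1
--
--         for i in range(0,len(numbers)):
--
--             if not found_valid:
--
--                 n = numbers[i]
--                 numbers_without_n = numbers[0:i] + numbers[i+1:len(numbers)]
--
--                 if n not in rules:
--                     found_valid = True
--                     index_found = i
--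
--                 else:
--                     if not any([other in rules[n] for other in numbers_without_n]):
--                         found_valid = True
--                         index_found = i
--
--         n = numbers[index_found]
--         numbers_without_n = numbers[0:index_found] + numbers[index_found+1:len(numbers)]
--         numbers = numbers_without_n
--         reordered_numbers.insert(0,n)
--
--     return reordered_numbers
--
-- rules = {}
-- ===== SOURCE B (Python) =====
-- def reorder_by_rules(numbers, rules):
--     # Kahn-style: counter-initialised out-degrees, incremental decrements,
--     # first-index sink selection, output built back-to-front by one reverse.
--     cnt = {}
--     for v in numbers:
--         cnt[v] = cnt.get(v, 0) + 1
--     rem = []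
--     for v in numbers:
--         tg = set(rules.get(v, ()))
--         deg = sum(cnt.get(w, 0) for w in tg) - (1 if v in tg else 0)
--         rem.append([v, tg, deg])
--     out = []
--     while rem:
--         k = next((j for j, e in enumerate(rem) if e[2] == 0), None)
--         if k is None:
--             raise ValueError("ordering rules contain a cycle")
--         v = rem.pop(k)[0]
--         for e in rem:
--             if v in e[1]:
--                 e[2] -= 1
--         out.append(v)
--     out.reverse()
--     return out
-- ===== Notes on version B (the rewrite author's own statement) =====
-- stated objective: faster
-- what changed: A rescans the whole remaining list per output slot per candidate (cubic); B is a Kahn-style topological sort: counter-initialised out-degrees decremented incrementally, first-index sink selection, output built by one final reverse; B raises ValueError where the rules are cyclic among the numbers (excluded by Pre_), where A's index -1 wraps to the last element and returns a corrupted list.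
-- outside the precondition, e.g. on reorder_by_rules([1, 2], {1: [2], 2: [1]}): A returns [2, 2], B raises ValueError
import Mathlib
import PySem

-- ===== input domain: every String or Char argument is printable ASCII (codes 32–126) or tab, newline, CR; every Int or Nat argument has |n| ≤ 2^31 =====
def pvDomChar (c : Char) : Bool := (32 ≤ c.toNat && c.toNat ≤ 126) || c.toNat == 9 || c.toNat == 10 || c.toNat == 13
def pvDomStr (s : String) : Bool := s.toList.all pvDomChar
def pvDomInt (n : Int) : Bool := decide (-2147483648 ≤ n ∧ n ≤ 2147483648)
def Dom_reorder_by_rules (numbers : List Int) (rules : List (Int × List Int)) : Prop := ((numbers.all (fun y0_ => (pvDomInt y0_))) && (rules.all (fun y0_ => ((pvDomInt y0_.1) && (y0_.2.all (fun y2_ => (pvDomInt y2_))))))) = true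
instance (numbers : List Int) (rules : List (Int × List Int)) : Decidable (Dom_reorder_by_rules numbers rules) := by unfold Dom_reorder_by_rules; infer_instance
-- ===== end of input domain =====

-- B replaces A's cubic rescan (for each output slot, for each candidate, scan all
-- remaining numbers) by Kahn-style sink selection with counter-initialised
-- out-degrees that are decremented incrementally; objective: faster.

-- ===== PORT A =====
def reorder_by_rules (numbers : List Int) (rules : List (Int × List Int)) : List Int :=
  let res := (PySem.List.pyRange 0 (numbers.length : Int) 1).foldl
    (fun (st : List Int × List Int) (_j : Int) =>
      let ns := st.1
      let inner := (PySem.List.pyRange 0 (ns.length : Int) 1).foldl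
        (fun (fv : Bool × Int) (i : Int) =>
          if fv.1 then fv
          else
            let n := (PySem.List.pyGet? ns i).getD 0
            let rest := PySem.List.slice ns (some 0) (some i) ++
                        PySem.List.slice ns (some (i + 1)) (some (ns.length : Int))
            if (PySem.Dict.mk rules).contains n = false then (true, i)
            else
              if !(rest.any (fun o => ((PySem.Dict.mk rules).getD n []).contains o)) then (true, i)
              else fv)
        (false, -1)
      let idx := inner.2
      let n := (PySem.List.pyGet? ns idx).getD 0
      let rest := PySem.List.slice ns (some 0) (some idx) ++
                  PySem.List.slice ns (some (idx + 1)) (some (ns.length : Int))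
      (rest, n :: st.2))
    (numbers, ([] : List Int))
  res.2

-- ===== PORT B =====
def reorderBLoop : Nat → List (Int × PySem.Set Int × Int) → List Int → List Int
  | 0, _, out => out
  | fuel + 1, rem, out =>
    match rem.findIdx? (fun e => e.2.2 == 0) with
    | none => out          -- Python B raises ValueError here (outside Pre_)
    | some k =>
      let v := ((rem[k]?).map (fun e => e.1)).getD 0
      let rem' := (rem.eraseIdx k).map
        (fun e => if PySem.Set.contains e.2.1 v then (e.1, e.2.1, e.2.2 - 1) else e)
      reorderBLoop fuel rem' (out ++ [v])

def reorder_by_rules_alt (numbers : List Int) (rules : List (Int × List Int)) : List Int :=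
  let cnt := numbers.foldl (fun (d : PySem.Dict Int Int) v => d.insert v (d.getD v 0 + 1)) PySem.Dict.empty
  let rem := numbers.foldl
    (fun (acc : List (Int × PySem.Set Int × Int)) v =>
      let tg : PySem.Set Int := PySem.Set.ofList ((PySem.Dict.mk rules).getD v [])
      let deg : Int := (tg.map (fun w => cnt.getD w 0)).sum -
                       (if PySem.Set.contains tg v then 1 else 0)
      acc ++ [(v, tg, deg)]) []
  (reorderBLoop rem.length rem []).reverse

-- ===== PRECONDITION & SPEC =====
-- the precedence relation A walks: b blocks a (a may not yet be placed while some
-- OTHER copy of b remains) — value-level, a self-edge needs a duplicated value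
def pvTg (rules : List (Int × List Int)) (v : Int) : List Int := (PySem.Dict.mk rules).getD v []
def pvEdge (numbers : List Int) (rules : List (Int × List Int)) (a b : Int) : Bool :=
  (pvTg rules a).contains b && numbers.contains a && numbers.contains b &&
    (a != b || 2 ≤ numbers.count a)
def pvSuccs (numbers : List Int) (rules : List (Int × List Int)) (a : Int) : List Int :=
  numbers.filter (fun b => pvEdge numbers rules a b)
def pvStepR (numbers : List Int) (rules : List (Int × List Int)) (S : List Int) : List Int :=
  (S ++ S.flatMap (pvSuccs numbers rules)).dedup
def pvReach (numbers : List Int) (rules : List (Int × List Int)) (a : Int) : List Int :=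
  (pvStepR numbers rules)^[numbers.length] (pvSuccs numbers rules a)

-- Pre_ excludes inputs whose precedence relation has a cycle among the given numbers:
-- there A's search finds no placeable number, index -1 wraps to the LAST element and
-- A's bookkeeping duplicates the remaining list, while B (a topological sort)
-- raises ValueError.
def Pre_reorder_by_rules (numbers : List Int) (rules : List (Int × List Int)) : Prop :=
  ∀ a ∈ numbers, a ∉ pvReach numbers rules a
instance (numbers : List Int) (rules : List (Int × List Int)) : Decidable (Pre_reorder_by_rules numbers rules) := by unfold Pre_reorder_by_rules; infer_instance

def pvWitness_reorder_by_rules : List Int × (List (Int × List Int)) := ([5, 3, 7], [(5, [3, 9]), (3, [7])])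

def Spec_reorder_by_rules (numbers : List Int) (rules : List (Int × List Int)) (out : List Int) : Prop := out = reorder_by_rules_alt numbers rules
instance (numbers : List Int) (rules : List (Int × List Int)) (out : List Int) : Decidable (Spec_reorder_by_rules numbers rules out) := by unfold Spec_reorder_by_rules; infer_instance

-- ===== CLAIM (what is proved, stated in full; the proofs are below) =====
def Claim_equal_reorder_by_rules : Prop := ∀ (numbers : List Int) (rules : List (Int × List Int)), Dom_reorder_by_rules numbers rules → Pre_reorder_by_rules numbers rules → Spec_reorder_by_rules numbers rules (reorder_by_rules numbers rules)

-- ===== LEMMAS AND PROOFS =====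

-- the common description both loops compute: repeatedly remove the first "sink"
-- (an element no other remaining element blocks), collecting removed values
def pvBlk (rules : List (Int × List Int)) (R : List Int) (i : Nat) : Nat :=
  (R.eraseIdx i).countP (fun o => (pvTg rules (R.getD i 0)).contains o)
def pvFirstSink (rules : List (Int × List Int)) (R : List Int) : Option Nat :=
  (List.range R.length).find? (fun i => pvBlk rules R i == 0)
def pvSpecGo (rules : List (Int × List Int)) : Nat → List Int → List Int → List Int
  | 0, _, out => out
  | fuel + 1, R, out =>
    match pvFirstSink rules R with
    | none => out
    | some k => pvSpecGo rules fuel (R.eraseIdx k) (out ++ [R.getD k 0])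

-- ---- small list facts ----
theorem pv_take_getElem_drop {α : Type} (l : List α) (i : Nat) (h : i < l.length) :
    l.take i ++ l[i] :: l.drop (i + 1) = l := by
  conv_rhs => rw [← List.take_append_drop i l]
  congr 1
  rw [List.drop_eq_getElem_cons h]

theorem pv_countP_eraseIdx (R : List Int) (p : Int → Bool) (i : Nat) (h : i < R.length) :
    R.countP p = (R.eraseIdx i).countP p + (if p R[i] then 1 else 0) := by
  rw [List.eraseIdx_eq_take_drop_succ]
  conv_lhs => rw [← pv_take_getElem_drop R i h]
  rw [List.countP_append, List.countP_append, List.countP_cons]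
  split_ifs with hp <;> omega

theorem pv_find?_congr {α : Type} (l : List α) (p q : α → Bool)
    (h : ∀ x ∈ l, p x = q x) : l.find? p = l.find? q := by
  induction l with
  | nil => rfl
  | cons x xs ih =>
    simp only [List.find?_cons]
    rw [h x (by simp)]
    cases q x <;> simp [ih (fun y hy => h y (by simp [hy]))]

theorem pv_findIdx?_eq_find?_range {α : Type} (p : α → Bool) (d : α) (l : List α) :
    l.findIdx? p = (List.range l.length).find? (fun i => p (l.getD i d)) := by
  induction l with
  | nil => rfl
  | cons x xs ih =>
    rw [List.findIdx?_cons]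
    simp only [List.length_cons, List.range_succ_eq_map, List.find?_cons]
    simp only [List.getD_cons_zero]
    cases hpx : p x
    · simp only [List.find?_map]
      rw [ih]
      congr 1
    · rfl

theorem pv_foldl_const {α σ : Type} (l : List α) (g : σ → σ) (s : σ) :
    l.foldl (fun s _ => g s) s = g^[l.length] s := by
  induction l generalizing s with
  | nil => rfl
  | cons x xs ih => simp [List.foldl_cons, ih, Function.iterate_succ_apply]

-- ---- B side: the out-degree bookkeeping is the blocker count ----
def pvDeg (rules : List (Int × List Int)) (R : List Int) (v : Int) : Int :=
  (R.countP (fun o => (pvTg rules v).contains o) : Int) -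
    (if (pvTg rules v).contains v then 1 else 0)
def pvF (rules : List (Int × List Int)) (R : List Int) (v : Int) : Int × PySem.Set Int × Int :=
  (v, PySem.Set.ofList (pvTg rules v), pvDeg rules R v)

theorem pv_deg_eq_blk (rules : List (Int × List Int)) (R : List Int) (i : Nat) (h : i < R.length) :
    pvDeg rules R R[i] = (pvBlk rules R i : Int) := by
  have hgd : R.getD i 0 = R[i] := by
    rw [List.getD_eq_getElem?_getD, List.getElem?_eq_getElem h]
    rfl
  unfold pvDeg pvBlk
  rw [hgd, pv_countP_eraseIdx R _ i h]
  push_cast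
  split_ifs <;> ring

theorem pv_sum_counts (ws : List Int) (hnd : ws.Nodup) (l : List Int) :
    ((ws.map (fun w => (l.count w : Int))).sum) = (l.countP (fun o => ws.contains o) : Int) := by
  induction l with
  | nil => simp
  | cons x l ih =>
    simp only [List.count_cons, List.countP_cons]
    push_cast
    rw [PySem.List.sum_map_add_int ws (fun w => (l.count w : Int)) (fun w => if x == w then 1 else 0)]
    rw [ih]
    congr 1
    rw [PySem.List.sum_map_ite_one_zero (fun w => x == w) ws]
    have : List.countP (fun w => x == w) ws = ws.count x := by
      rw [List.count]
      exact List.countP_congr (fun a _ => by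
        cases h : x == a
        · cases h2 : a == x
          · rfl
          · exact absurd (beq_iff_eq.mp h2).symm (by simpa using h)
        · cases h2 : a == x
          · exact absurd (beq_iff_eq.mp h).symm (by simpa using h2)
          · rfl)
    rw [this]
    by_cases hm : x ∈ ws
    · simp [List.count_eq_one_of_mem hnd hm, hm]
    · simp [List.count_eq_zero_of_not_mem hm, hm]

theorem pv_contains_ofList (l : List Int) (x : Int) :
    List.contains (PySem.Set.ofList l) x = List.contains l x := by
  rw [Bool.eq_iff_iff, List.contains_iff_mem, List.contains_iff_mem]
  exact PySem.Set.mem_ofList l x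

theorem pv_rem_init (numbers : List Int) (rules : List (Int × List Int)) :
    (numbers.foldl
      (fun (acc : List (Int × PySem.Set Int × Int)) v =>
        let tg : PySem.Set Int := PySem.Set.ofList ((PySem.Dict.mk rules).getD v [])
        let deg : Int := (tg.map (fun w => (numbers.foldl (fun (d : PySem.Dict Int Int) v => d.insert v (d.getD v 0 + 1)) PySem.Dict.empty).getD w 0)).sum -
                         (if PySem.Set.contains tg v then 1 else 0)
        acc ++ [(v, tg, deg)]) []) = numbers.map (pvF rules numbers) := by
  show numbers.foldl (fun acc v => acc ++ [_]) [] = _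
  rw [PySem.List.foldl_append_singleton_eq_map]
  rw [List.nil_append]
  apply List.map_congr_left
  intro v _
  unfold pvF
  refine Prod.ext rfl (Prod.ext rfl ?_)
  show (List.map _ (PySem.Set.ofList (pvTg rules v))).sum - _ = pvDeg rules numbers v
  have hmap : (PySem.Set.ofList (pvTg rules v) : List Int).map
      (fun w => (numbers.foldl (fun (d : PySem.Dict Int Int) v => d.insert v (d.getD v 0 + 1)) PySem.Dict.empty).getD w 0)
      = (PySem.Set.ofList (pvTg rules v) : List Int).map (fun w => (numbers.count w : Int)) := by
    apply List.map_congr_left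
    intro w _
    rw [PySem.Dict.getD_foldl_insert_add_one]
    simp [PySem.Dict.getD_empty]
  rw [hmap, pv_sum_counts _ (PySem.Set.nodup_ofList _) numbers]
  unfold pvDeg
  congr 1
  · congr 1
    apply List.countP_congr
    intro o _
    rw [pv_contains_ofList (pvTg rules v) o]
  · show (if List.contains (PySem.Set.ofList (pvTg rules v)) v = true then (1:Int) else 0) = _
    rw [pv_contains_ofList]

theorem pv_cast_beq_zero (n : Nat) : ((n : Int) == 0) = (n == 0) := by
  rw [Bool.eq_iff_iff]
  simp

theorem pv_firstZero_eq_firstSink (rules : List (Int × List Int)) (R : List Int) :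
    (R.map (pvF rules R)).findIdx? (fun e => e.2.2 == 0) = pvFirstSink rules R := by
  rw [List.findIdx?_map, pv_findIdx?_eq_find?_range _ 0 R]
  unfold pvFirstSink
  apply pv_find?_congr
  intro i hi
  have hlt : i < R.length := List.mem_range.mp hi
  have hgd : R.getD i 0 = R[i] := by
    rw [List.getD_eq_getElem?_getD, List.getElem?_eq_getElem hlt]
    rfl
  show (pvDeg rules R (R.getD i 0) == 0) = _
  rw [hgd, pv_deg_eq_blk rules R i hlt, pv_cast_beq_zero]

theorem pv_dec_inv (rules : List (Int × List Int)) (R : List Int) (k : Nat) (hk : k < R.length) :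
    ((R.eraseIdx k).map (pvF rules R)).map
        (fun e => if PySem.Set.contains e.2.1 R[k] then (e.1, e.2.1, e.2.2 - 1) else e)
      = (R.eraseIdx k).map (pvF rules (R.eraseIdx k)) := by
  rw [List.map_map]
  apply List.map_congr_left
  intro w _
  show (if PySem.Set.contains (PySem.Set.ofList (pvTg rules w)) R[k] then _ else _) = _
  have hdeg : pvDeg rules (R.eraseIdx k) w
      = pvDeg rules R w - (if (pvTg rules w).contains R[k] then 1 else 0) := by
    unfold pvDeg
    have := pv_countP_eraseIdx R (fun o => (pvTg rules w).contains o) k hk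
    split_ifs at this ⊢ <;> omega
  have hcon : PySem.Set.contains (PySem.Set.ofList (pvTg rules w)) R[k]
      = (pvTg rules w).contains R[k] := by
    rw [PySem.Set.contains_eq_listContains, pv_contains_ofList]
  rw [hcon]
  unfold pvF
  rw [hdeg]
  by_cases hc : R[k] ∈ pvTg rules w
  · simp [hc]
  · have hf : (pvTg rules w).contains R[k] = false := by
      rw [Bool.eq_false_iff]
      intro hcc
      exact hc (List.contains_iff_mem.mp hcc)
    simp [hc]

theorem pv_bloop_eq (rules : List (Int × List Int)) :
    ∀ (fuel : Nat) (R out : List Int),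
      reorderBLoop fuel (R.map (pvF rules R)) out = pvSpecGo rules fuel R out := by
  intro fuel
  induction fuel with
  | zero => intro R out; rfl
  | succ fuel ih =>
    intro R out
    show (match (R.map (pvF rules R)).findIdx? (fun e => e.2.2 == 0) with
      | none => out
      | some k =>
        let v := (((R.map (pvF rules R))[k]?).map (fun (e : Int × PySem.Set Int × Int) => e.1)).getD 0
        let rem' := ((R.map (pvF rules R)).eraseIdx k).map
          (fun (e : Int × PySem.Set Int × Int) => if PySem.Set.contains e.2.1 v then (e.1, e.2.1, e.2.2 - 1) else e)
        reorderBLoop fuel rem' (out ++ [v])) = _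
    rw [pv_firstZero_eq_firstSink]
    cases h : pvFirstSink rules R with
    | none => simp only [pvSpecGo, h]
    | some k =>
      have hk : k < R.length := by
        have hmem := List.mem_of_find?_eq_some h
        exact List.mem_range.mp hmem
      have hv : (((R.map (pvF rules R))[k]?).map (fun e => e.1)).getD 0 = R[k] := by
        rw [List.getElem?_map, List.getElem?_eq_getElem hk]
        rfl
      simp only [pvSpecGo, h, hv]
      rw [List.eraseIdx_map, pv_dec_inv rules R k hk, ih]
      have hgd : R.getD k 0 = R[k] := by
        rw [List.getD_eq_getElem?_getD, List.getElem?_eq_getElem hk]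
        rfl
      rw [hgd]

theorem pv_alt_eq (numbers : List Int) (rules : List (Int × List Int)) :
    reorder_by_rules_alt numbers rules = (pvSpecGo rules numbers.length numbers []).reverse := by
  show (reorderBLoop _ _ []).reverse = _
  rw [pv_rem_init numbers rules, List.length_map, pv_bloop_eq rules numbers.length numbers []]

-- ---- acyclicity: if some remaining multiset has no sink, a value sits on a cycle ----
def pvPath (numbers : List Int) (rules : List (Int × List Int)) : Nat → Int → Int → Prop
  | 0, a, b => a = b
  | k + 1, a, b => ∃ c, pvEdge numbers rules a c = true ∧ pvPath numbers rules k c b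

theorem pv_mem_step_self (numbers : List Int) (rules : List (Int × List Int)) (S : List Int)
    (x : Int) (hx : x ∈ S) : x ∈ pvStepR numbers rules S := by
  unfold pvStepR
  rw [List.mem_dedup]
  exact List.mem_append_left _ hx

theorem pv_mem_step_edge (numbers : List Int) (rules : List (Int × List Int)) (S : List Int)
    (a b : Int) (ha : a ∈ S) (he : pvEdge numbers rules a b = true) :
    b ∈ pvStepR numbers rules S := by
  unfold pvStepR
  rw [List.mem_dedup]
  apply List.mem_append_right
  rw [List.mem_flatMap]
  refine ⟨a, ha, ?_⟩
  unfold pvSuccs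
  rw [List.mem_filter]
  have hb : b ∈ numbers := by
    unfold pvEdge at he
    simp only [Bool.and_eq_true] at he
    exact List.contains_iff_mem.mp he.1.2
  exact ⟨hb, he⟩

theorem pv_path_mem_iter (numbers : List Int) (rules : List (Int × List Int)) :
    ∀ (k : Nat) (S : List Int) (c b : Int), c ∈ S → pvPath numbers rules k c b →
      b ∈ (pvStepR numbers rules)^[k] S := by
  intro k
  induction k with
  | zero =>
    intro S c b hc hp
    exact (show c = b from hp) ▸ hc
  | succ k ih =>
    intro S c b hc hp
    obtain ⟨d, hd, hp'⟩ := hp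
    rw [Function.iterate_succ_apply]
    exact ih _ d b (pv_mem_step_edge numbers rules S c d hc hd) hp' 

theorem pv_iter_mono (numbers : List Int) (rules : List (Int × List Int)) (S : List Int)
    (x : Int) : ∀ (j m : Nat), j ≤ m → x ∈ (pvStepR numbers rules)^[j] S →
      x ∈ (pvStepR numbers rules)^[m] S := by
  intro j m hle hmem
  induction m with
  | zero =>
    have : j = 0 := Nat.le_zero.mp hle
    exact this ▸ hmem
  | succ m ih =>
    rcases Nat.lt_or_ge j (m + 1) with hlt | hge
    · rw [Function.iterate_succ_apply']
      exact pv_mem_step_self numbers rules _ x (ih (Nat.lt_succ_iff.mp hlt))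
    · have : j = m + 1 := Nat.le_antisymm hle hge
      exact this ▸ hmem

theorem pv_no_sink_cycle (numbers : List Int) (rules : List (Int × List Int)) (R : List Int)
    (hsub : R.Sublist numbers) (hne : R ≠ [])
    (h : ∀ i, i < R.length → pvBlk rules R i ≠ 0) :
    ∃ a k, a ∈ numbers ∧ k + 1 ≤ R.length ∧ pvPath numbers rules (k + 1) a a := by
  -- every remaining value has an out-edge to a remaining value
  have HH : ∀ v ∈ R, ∃ o, o ∈ R ∧ pvEdge numbers rules v o = true := by
    intro v hv
    obtain ⟨i, hi, hvi⟩ := List.getElem_of_mem hv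
    have hgd : R.getD i 0 = v := by
      rw [List.getD_eq_getElem?_getD, List.getElem?_eq_getElem hi, hvi]
      rfl
    have hpos : 0 < (R.eraseIdx i).countP (fun o => (pvTg rules (R.getD i 0)).contains o) :=
      Nat.pos_of_ne_zero (h i hi)
    obtain ⟨o, ho, hp⟩ := List.countP_pos_iff.mp hpos
    have hoR : o ∈ R := (List.eraseIdx_sublist R i).subset ho
    refine ⟨o, hoR, ?_⟩
    unfold pvEdge
    have h1 : (pvTg rules v).contains o = true := by rw [← hgd]; exact hp
    have h2 : numbers.contains v = true := List.contains_iff_mem.mpr (hsub.subset hv)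
    have h3 : numbers.contains o = true := List.contains_iff_mem.mpr (hsub.subset hoR)
    rw [h1, h2, h3]
    by_cases hvo : v = o
    · have hcnt : 2 ≤ numbers.count v := by
        have hco : 0 < (R.eraseIdx i).count v := by
          rw [List.count_pos_iff]
          exact hvo ▸ ho
        have := pv_countP_eraseIdx R (fun x => x == v) i hi
        rw [hvi] at this
        simp only [BEq.rfl, if_true] at this
        have hR2 : 2 ≤ R.count v := by
          rw [List.count, this]
          have : 0 < (R.eraseIdx i).countP (fun x => x == v) := hco
          omega
        exact le_trans hR2 (hsub.count_le v)
      simp [hcnt]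
    · simp [bne_iff_ne, hvo]
  -- a successor choice, iterated, must repeat
  have hne' : ∃ v0, v0 ∈ R := List.exists_mem_of_ne_nil R hne
  obtain ⟨v0, hv0⟩ := hne'
  classical
  let σ : Int → Int := fun v => if hh : ∃ o, o ∈ R ∧ pvEdge numbers rules v o = true then hh.choose else 0
  have hσ : ∀ v ∈ R, σ v ∈ R ∧ pvEdge numbers rules v (σ v) = true := by
    intro v hv
    have hh := HH v hv
    show (if hh' : _ then _ else _) ∈ R ∧ pvEdge numbers rules v (if hh' : _ then _ else _) = true
    rw [dif_pos hh]
    exact hh.choose_spec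
  have hseqmem : ∀ n : Nat, σ^[n] v0 ∈ R := by
    intro n
    induction n with
    | zero => exact hv0
    | succ n ih =>
      rw [Function.iterate_succ_apply']
      exact (hσ _ ih).1
  have hcard : (R.toFinset).card < (Finset.range (R.length + 1)).card := by
    rw [Finset.card_range]
    exact Nat.lt_succ_of_le (List.toFinset_card_le R)
  obtain ⟨p, hp, q, hq, hpq, heq⟩ :=
    Finset.exists_ne_map_eq_of_card_lt_of_maps_to hcard
      (fun n _ => List.mem_toFinset.mpr (hseqmem n))
  have hpath : ∀ (m : Nat) (x : Int), x ∈ R → pvPath numbers rules m x (σ^[m] x) := by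
    intro m
    induction m with
    | zero => intro x _; rfl
    | succ m ih =>
      intro x hx
      exact ⟨σ x, (hσ x hx).2, Function.iterate_succ_apply σ m x ▸ ih (σ x) (hσ x hx).1⟩
  -- wlog p < q
  have main : ∀ p q : Nat, p < q → q < R.length + 1 → σ^[p] v0 = σ^[q] v0 →
      ∃ a k, a ∈ numbers ∧ k + 1 ≤ R.length ∧ pvPath numbers rules (k + 1) a a := by
    intro p q hlt hqb heq2
    obtain ⟨k, hk⟩ : ∃ k, q - p = k + 1 := ⟨q - p - 1, by omega⟩
    have hsplit : σ^[q] v0 = σ^[q - p] (σ^[p] v0) := by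
      rw [← Function.iterate_add_apply]
      congr 1
      omega
    refine ⟨σ^[p] v0, k, hsub.subset (hseqmem p), by omega, ?_⟩
    have := hpath (q - p) (σ^[p] v0) (hseqmem p)
    rw [← hsplit, ← heq2] at this
    exact hk ▸ this
  rcases lt_trichotomy p q with hlt | heqc | hgt
  · exact main p q hlt (Finset.mem_range.mp hq) heq
  · exact absurd heqc hpq
  · exact main q p hgt (Finset.mem_range.mp hp) heq.symm

theorem pv_sink_exists (numbers : List Int) (rules : List (Int × List Int)) (R : List Int)
    (hpre : Pre_reorder_by_rules numbers rules) (hsub : R.Sublist numbers) (hne : R ≠ []) :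
    ∃ k, pvFirstSink rules R = some k ∧ k < R.length := by
  cases hfs : pvFirstSink rules R with
  | some k =>
    exact ⟨k, rfl, List.mem_range.mp (List.mem_of_find?_eq_some hfs)⟩
  | none =>
    exfalso
    have hall : ∀ i, i < R.length → pvBlk rules R i ≠ 0 := by
      intro i hi hz
      have := List.find?_eq_none.mp hfs i (List.mem_range.mpr hi)
      simp [hz] at this
    obtain ⟨a, k, hamem, hkle, hpath⟩ := pv_no_sink_cycle numbers rules R hsub hne hall
    obtain ⟨c, hedge, hp⟩ := hpath
    have hcs : c ∈ pvSuccs numbers rules a := by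
      unfold pvSuccs
      rw [List.mem_filter]
      have hc : c ∈ numbers := by
        unfold pvEdge at hedge
        simp only [Bool.and_eq_true] at hedge
        exact List.contains_iff_mem.mp hedge.1.2
      exact ⟨hc, hedge⟩
    have hreach : a ∈ (pvStepR numbers rules)^[k] (pvSuccs numbers rules a) :=
      pv_path_mem_iter numbers rules k (pvSuccs numbers rules a) c a hcs hp
    have hkn : k ≤ numbers.length := le_trans (by omega) (le_trans hkle hsub.length_le)
    have : a ∈ pvReach numbers rules a :=
      pv_iter_mono numbers rules (pvSuccs numbers rules a) a k numbers.length hkn hreach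
    exact hpre a hamem this

-- ---- A side ----
def pvInnerP (rules : List (Int × List Int)) (ns : List Int) (i : Int) : Bool :=
  !((PySem.Dict.mk rules).contains ((PySem.List.pyGet? ns i).getD 0)) ||
  !((PySem.List.slice ns (some 0) (some i) ++
      PySem.List.slice ns (some (i + 1)) (some (ns.length : Int))).any
      (fun o => ((PySem.Dict.mk rules).getD ((PySem.List.pyGet? ns i).getD 0) []).contains o))

theorem pv_foldl_flag (p : Int → Bool) :
    ∀ (l : List Int) (st : Bool × Int),
      l.foldl (fun fv i => if fv.1 then fv else if p i then (true, i) else fv) st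
        = if st.1 then st else (match l.find? p with | some i => (true, i) | none => st) := by
  intro l
  induction l with
  | nil =>
    intro st
    cases hb : st.1 <;> simp [hb]
  | cons x xs ih =>
    intro st
    rw [List.foldl_cons]
    cases hb : st.1
    · cases hpx : p x
      · simp only [hb, hpx, Bool.false_eq_true, if_false]
        rw [ih st]
        simp [hb, List.find?_cons, hpx]
      · simp only [hb, hpx, Bool.false_eq_true, if_false, if_true]
        rw [ih (true, x)]
        simp [hb, List.find?_cons, hpx]
    · simp only [hb, if_true]
      rw [ih st]
      simp [hb]

theorem pv_slice_eraseIdx (ns : List Int) (k : Nat) (hk : k < ns.length) :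
    PySem.List.slice ns (some 0) (some (k : Int)) ++
      PySem.List.slice ns (some ((k : Int) + 1)) (some (ns.length : Int)) = ns.eraseIdx k := by
  have h1 : PySem.List.slice ns (some (0 : Int)) (some (k : Int)) = ns.take k := by
    rw [PySem.List.slice_zero_start, PySem.List.slice_to_natCast]
  have hcast : ((k : Int) + 1) = ((k + 1 : Nat) : Int) := by push_cast; ring
  have h2 : PySem.List.slice ns (some ((k : Int) + 1)) (some (ns.length : Int)) = ns.drop (k + 1) := by
    rw [hcast, PySem.List.slice_natCast]
    apply List.take_of_length_le
    rw [List.length_drop]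
  rw [h1, h2, List.eraseIdx_eq_take_drop_succ]

theorem pv_innerP_eq_blk (rules : List (Int × List Int)) (ns : List Int) (k : Nat)
    (hk : k < ns.length) : pvInnerP rules ns (k : Int) = (pvBlk rules ns k == 0) := by
  unfold pvInnerP pvBlk
  have hget : (PySem.List.pyGet? ns ((k : Nat) : Int)).getD 0 = ns.getD k 0 := by
    rw [PySem.List.pyGet?_natCast, List.getD_eq_getElem?_getD]
  rw [hget, pv_slice_eraseIdx ns k hk]
  unfold pvTg
  cases hc : (PySem.Dict.mk rules).contains (ns.getD k 0)
  · have hnil : (PySem.Dict.mk rules).getD (ns.getD k 0) [] = [] :=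
      PySem.Dict.getD_of_not_contains _ _ hc
    rw [hnil]
    simp
  · simp only [Bool.not_true, Bool.false_or]
    cases ha : (ns.eraseIdx k).any (fun o => ((PySem.Dict.mk rules).getD (ns.getD k 0) []).contains o)
    · have hz : (ns.eraseIdx k).countP (fun o => ((PySem.Dict.mk rules).getD (ns.getD k 0) []).contains o) = 0 := by
        rw [List.countP_eq_zero]
        intro a hmem hpa
        have := List.any_eq_true.mpr ⟨a, hmem, hpa⟩
        rw [ha] at this
        exact Bool.false_ne_true this
      rw [hz]
      rfl
    · obtain ⟨a, hmem, hpa⟩ := List.any_eq_true.mp ha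
      have hpos : 0 < (ns.eraseIdx k).countP (fun o => ((PySem.Dict.mk rules).getD (ns.getD k 0) []).contains o) :=
        List.countP_pos_iff.mpr ⟨a, hmem, hpa⟩
      rw [Bool.eq_iff_iff]
      constructor
      · intro hfalse
        exact absurd hfalse (by decide)
      · intro hz
        rw [beq_iff_eq] at hz
        omega

def pvStepA (rules : List (Int × List Int)) (st : List Int × List Int) : List Int × List Int :=
  let ns := st.1
  let inner := (PySem.List.pyRange 0 (ns.length : Int) 1).foldl
    (fun (fv : Bool × Int) (i : Int) =>
      if fv.1 then fv
      else
        let n := (PySem.List.pyGet? ns i).getD 0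
        let rest := PySem.List.slice ns (some 0) (some i) ++
                    PySem.List.slice ns (some (i + 1)) (some (ns.length : Int))
        if (PySem.Dict.mk rules).contains n = false then (true, i)
        else
          if !(rest.any (fun o => ((PySem.Dict.mk rules).getD n []).contains o)) then (true, i)
          else fv)
    (false, -1)
  let idx := inner.2
  let n := (PySem.List.pyGet? ns idx).getD 0
  let rest := PySem.List.slice ns (some 0) (some idx) ++
              PySem.List.slice ns (some (idx + 1)) (some (ns.length : Int))
  (rest, n :: st.2)

theorem pv_specGo_out (rules : List (Int × List Int)) :
    ∀ (fuel : Nat) (R out : List Int), pvSpecGo rules fuel R out = out ++ pvSpecGo rules fuel R [] := by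
  intro fuel
  induction fuel with
  | zero => intro R out; simp [pvSpecGo]
  | succ fuel ih =>
    intro R out
    show (match pvFirstSink rules R with
      | none => out
      | some k => pvSpecGo rules fuel (R.eraseIdx k) (out ++ [R.getD k 0])) = _
    cases h : pvFirstSink rules R with
    | none => simp [pvSpecGo, h]
    | some k =>
      simp only [pvSpecGo, h]
      rw [ih (R.eraseIdx k) (out ++ [R.getD k 0]), ih (R.eraseIdx k) ([] ++ [R.getD k 0])]
      simp

theorem pv_stepA_eq (numbers : List Int) (rules : List (Int × List Int)) (ns acc : List Int)
    (hpre : Pre_reorder_by_rules numbers rules) (hsub : ns.Sublist numbers) (hne : ns ≠ []) :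
    ∃ k, pvFirstSink rules ns = some k ∧ k < ns.length ∧
      pvStepA rules (ns, acc) = (ns.eraseIdx k, ns.getD k 0 :: acc) := by
  obtain ⟨k, hfs, hk⟩ := pv_sink_exists numbers rules ns hpre hsub hne
  refine ⟨k, hfs, hk, ?_⟩
  have hbody : (fun (fv : Bool × Int) (i : Int) =>
      if fv.1 then fv
      else
        let n := (PySem.List.pyGet? ns i).getD 0
        let rest := PySem.List.slice ns (some 0) (some i) ++
                    PySem.List.slice ns (some (i + 1)) (some (ns.length : Int))
        if (PySem.Dict.mk rules).contains n = false then (true, i)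
        else
          if !(rest.any (fun o => ((PySem.Dict.mk rules).getD n []).contains o)) then (true, i)
          else fv)
    = (fun (fv : Bool × Int) (i : Int) => if fv.1 then fv else if pvInnerP rules ns i then (true, i) else fv) := by
    funext fv i
    by_cases hf : fv.1 = true
    · simp [hf]
    · simp only [Bool.not_eq_true] at hf
      simp only [hf, Bool.false_eq_true, if_false]
      unfold pvInnerP
      cases hc : (PySem.Dict.mk rules).contains ((PySem.List.pyGet? ns i).getD 0)
      · simp [hc]
      · simp [hc]
  have hrange : PySem.List.pyRange 0 (ns.length : Int) 1
      = (List.range ns.length).map (fun j : Nat => (j : Int)) := by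
    rw [PySem.List.pyRange_one]
    simp
  have hfind : ((List.range ns.length).map (fun j : Nat => (j : Int))).find?
      (pvInnerP rules ns) = some (k : Int) := by
    rw [List.find?_map]
    have hcongr : (List.range ns.length).find? ((pvInnerP rules ns) ∘ (fun j : Nat => (j : Int)))
        = (List.range ns.length).find? (fun i => pvBlk rules ns i == 0) := by
      apply pv_find?_congr
      intro j hj
      exact pv_innerP_eq_blk rules ns j (List.mem_range.mp hj)
    rw [hcongr]
    show ((pvFirstSink rules ns).map _) = _
    rw [hfs]
    rfl
  simp only [pvStepA]
  rw [hbody, hrange, pv_foldl_flag (pvInnerP rules ns) _ (false, -1)]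
  simp only [Bool.false_eq_true, if_false, hfind]
  have hget : (PySem.List.pyGet? ns ((k : Nat) : Int)).getD 0 = ns.getD k 0 := by
    rw [PySem.List.pyGet?_natCast, List.getD_eq_getElem?_getD]
  rw [hget, pv_slice_eraseIdx ns k hk]

theorem pv_iterA (numbers : List Int) (rules : List (Int × List Int))
    (hpre : Pre_reorder_by_rules numbers rules) :
    ∀ (fuel : Nat) (ns acc : List Int), ns.Sublist numbers → ns.length = fuel →
      ((pvStepA rules)^[fuel] (ns, acc)).2 = (pvSpecGo rules fuel ns []).reverse ++ acc := by
  intro fuel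
  induction fuel with
  | zero =>
    intro ns acc _ _
    simp [pvSpecGo]
  | succ fuel ih =>
    intro ns acc hsub hlen
    have hne : ns ≠ [] := by
      intro h
      rw [h] at hlen
      simp at hlen
    obtain ⟨k, hfs, hk, hstep⟩ := pv_stepA_eq numbers rules ns acc hpre hsub hne
    rw [Function.iterate_succ_apply, hstep]
    have hsub' : (ns.eraseIdx k).Sublist numbers := (List.eraseIdx_sublist ns k).trans hsub
    have hlen' : (ns.eraseIdx k).length = fuel := by
      rw [List.length_eraseIdx]
      simp only [hk, if_true]
      omega
    rw [ih (ns.eraseIdx k) (ns.getD k 0 :: acc) hsub' hlen']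
    have hsg : pvSpecGo rules (fuel + 1) ns []
        = [ns.getD k 0] ++ pvSpecGo rules fuel (ns.eraseIdx k) [] := by
      show (match pvFirstSink rules ns with
        | none => ([] : List Int)
        | some k' => pvSpecGo rules fuel (ns.eraseIdx k') ([] ++ [ns.getD k' 0])) = _
      rw [hfs]
      simpa using pv_specGo_out rules fuel (ns.eraseIdx k) [ns.getD k 0]
    rw [hsg]
    simp

theorem pv_A_eq (numbers : List Int) (rules : List (Int × List Int))
    (hpre : Pre_reorder_by_rules numbers rules) :
    reorder_by_rules numbers rules = (pvSpecGo rules numbers.length numbers []).reverse := by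
  show ((PySem.List.pyRange 0 (numbers.length : Int) 1).foldl
      (fun st _ => pvStepA rules st) (numbers, ([] : List Int))).2 = _
  rw [pv_foldl_const]
  have hlen : (PySem.List.pyRange 0 (numbers.length : Int) 1).length = numbers.length := by
    rw [PySem.List.length_pyRange_one]
    simp
  rw [hlen, pv_iterA numbers rules hpre numbers.length numbers [] (List.Sublist.refl numbers) rfl]
  simp

-- ===== VERDICT (by name: the statement is the Claim_ definition above) =====
theorem reorder_by_rules_spec : Claim_equal_reorder_by_rules := by
  intro numbers rules _hdom hpre
  unfold Spec_reorder_by_rules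
  rw [pv_A_eq numbers rules hpre, pv_alt_eq numbers rules]
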